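-- pv_equiv track=rewrite | github.com/juneyochen/sc-projects | stanCode_Projects/hangman_game/similarity.py | check_dna
-- ===== SOURCE A (Python) =====
-- def check_dna(dna_long, dna_short):
--     """
--     :param dna_long: the DNA sequence that should be checked
--     :param dna_short: the targeted DNA sequence
--     :return: the most similar part in the long DNA sequence
--     My idea is that:
--     1. use a max_number to load the most similar sequence
--     2. compare the length of the long DNA and short DNA
--     3. if there is a base in the long DNA as same as the short DNA, the number should add 1
--     4. if the number is the maximum number, remember the position of the number as M
--     5. print the position from M to the length of the short DNA
--     """
--     max_number = 0
--     for i in range(len(dna_long)-len(dna_short)+1):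
--         number = 0
--         for j in range(len(dna_short)):
--             if dna_short[j] == dna_long[j+i]:
--                 number += 1
--         if number > max_number:
--             max_number = number
--             M = i
--     return dna_long[M:M + len(dna_short)]
-- ===== SOURCE B (Python) =====
-- def _first_greater(a, x):
--     """First index idx with a[idx] > x in the sorted list a (bisect right)."""
--     lo, hi = 0, len(a)
--     while lo < hi:
--         mid = (lo + hi) // 2
--         if a[mid] <= x:
--             lo = mid + 1
--         else:
--             hi = mid
--     return lo
--
--
-- def check_dna(dna_long, dna_short):
--     """Cross-correlation by base: index the positions of each base in dna_short,
--     scan dna_long once scattering +1 into a counter keyed by window offset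
--     (binary search clips each position list to the offsets in range),
--     then pick the earliest offset with the maximal count."""
--     n, m = len(dna_long), len(dna_short)
--     w = n - m + 1
--     pos = {}
--     for j, c in enumerate(dna_short):
--         pos.setdefault(c, []).append(j)
--     counts = {}
--     for p, c in enumerate(dna_long):
--         js = pos.get(c, ())
--         lo = _first_greater(js, p - w)
--         hi = _first_greater(js, p)
--         for idx in range(lo, hi):
--             i = p - js[idx]
--             counts[i] = counts.get(i, 0) + 1
--     best = max(counts.get(i, 0) for i in range(w))
--     M = next(i for i in range(w) if counts.get(i, 0) == best)
--     return dna_long[M:M + m]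
-- ===== Notes on version B (the rewrite author's own statement) =====
-- stated objective: alternative
-- what changed: A counts matches by comparing every window against dna_short with nested indexed loops; B never compares windows: it builds a dict of each base's positions in dna_short, scans dna_long once scattering +1 into a counter keyed by window offset (per-base cross-correlation, binary search clips each position list to in-range offsets), then takes the earliest offset attaining the maximal count.
import Mathlib
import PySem

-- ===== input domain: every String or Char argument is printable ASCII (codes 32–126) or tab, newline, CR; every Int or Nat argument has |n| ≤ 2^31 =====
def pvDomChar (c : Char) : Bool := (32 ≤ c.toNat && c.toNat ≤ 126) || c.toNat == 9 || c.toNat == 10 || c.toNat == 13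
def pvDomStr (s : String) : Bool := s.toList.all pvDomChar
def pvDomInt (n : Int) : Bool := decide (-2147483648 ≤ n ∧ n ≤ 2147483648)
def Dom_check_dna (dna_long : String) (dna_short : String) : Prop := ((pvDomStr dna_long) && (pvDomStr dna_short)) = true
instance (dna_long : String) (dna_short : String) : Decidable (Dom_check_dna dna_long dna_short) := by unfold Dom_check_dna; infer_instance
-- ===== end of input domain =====

-- B replaces A's window-by-window comparison by per-base cross-correlation: index dna_short's positions per base, scatter +1 per long-position into an offset counter, then earliest argmax (alternative algorithm, no window comparisons).


-- ===== PORT A =====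
-- Literal port of A: outer loop over i, inner loop counting positional matches,
-- state (max_number, M); M starts unassigned (none = Python's unbound local).
def check_dna (dna_long : String) (dna_short : String) : String :=
  let L := dna_long.toList
  let S := dna_short.toList
  let st := (PySem.List.pyRange 0 ((L.length : Int) - (S.length : Int) + 1) 1).foldl
    (fun (st : Int × Option Int) i =>
      let number := (PySem.List.pyRange 0 (S.length : Int) 1).foldl
        (fun n j => if PySem.List.pyGet? S j = PySem.List.pyGet? L (j + i) then n + 1 else n) (0 : Int)
      if number > st.1 then (number, some i) else st)
    ((0 : Int), (none : Option Int))
  match st.2 with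
  | some M => String.ofList (PySem.List.slice L (some M) (some (M + (S.length : Int))))
  | none => ""  -- Python raises UnboundLocalError here (M never assigned); excluded by Pre_check_dna

-- ===== PORT B =====
-- def _first_greater(a, x): lo, hi = 0, len(a); while lo < hi: mid = (lo+hi)//2; ...
-- every a[mid] has 0 <= lo <= mid < hi <= len(a), so Python's a[mid] is List.getD (exact)
def pvFirstGreater (a : List Int) (x : Int) (lo hi : Nat) : Nat :=
  if _h : lo < hi then
    if a.getD ((lo + hi) / 2) 0 ≤ x then pvFirstGreater a x ((lo + hi) / 2 + 1) hi
    else pvFirstGreater a x lo ((lo + hi) / 2)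
  else lo
termination_by hi - lo
decreasing_by all_goals omega

-- pos = {}; for j, c in enumerate(dna_short): pos.setdefault(c, []).append(j)
-- counts = {}; for p, c in enumerate(dna_long):
--   js = pos.get(c, ()); lo = _first_greater(js, p - w); hi = _first_greater(js, p)
--   for idx in range(lo, hi): i = p - js[idx]; counts[i] = counts.get(i, 0) + 1
--     (js[idx] with lo <= idx < hi <= len(js): in range, so pyGetD is exact)
-- best = max(counts.get(i, 0) for i in range(w)); M = next(i for i in range(w) if counts.get(i, 0) == best)
def check_dna_alt (dna_long : String) (dna_short : String) : String :=
  let L := dna_long.toList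
  let S := dna_short.toList
  let n : Int := L.length
  let m : Int := S.length
  let w : Int := n - m + 1
  let pos : PySem.Dict Char (List Int) :=
    (PySem.List.enumerate S 0).foldl
      (fun d jc => d.modify jc.2 [] (fun t => t ++ [jc.1])) PySem.Dict.empty
  let counts : PySem.Dict Int Int :=
    (PySem.List.enumerate L 0).foldl
      (fun d pc =>
        let js := pos.getD pc.2 []
        let lo := pvFirstGreater js (pc.1 - w) 0 js.length
        let hi := pvFirstGreater js pc.1 0 js.length
        (PySem.List.pyRange (lo : Int) (hi : Int) 1).foldl
          (fun d idx => d.modify (pc.1 - PySem.List.pyGetD js idx 0) 0 (fun t => t + 1))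
          d)
      PySem.Dict.empty
  match PySem.List.max? ((PySem.List.pyRange 0 w 1).map (fun i => counts.getD i 0)) (fun x => x) with
  | none => ""  -- Python: max(empty generator) raises ValueError; excluded by Pre_check_dna
  | some best =>
    match (PySem.List.pyRange 0 w 1).find? (fun i => counts.getD i 0 == best) with
    | some M => String.ofList (PySem.List.slice L (some M) (some (M + m)))
    | none => ""  -- unreachable: best is attained by some offset

-- ===== PRECONDITION & SPEC =====
-- Pre_: exactly the inputs where A returns: the short strand fits and at least one
-- window position agrees with it on at least one base (otherwise M is never assigned and A raises).
def Pre_check_dna (dna_long : String) (dna_short : String) : Prop :=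
  dna_short.toList.length ≤ dna_long.toList.length ∧
  ∃ i < dna_long.toList.length - dna_short.toList.length + 1,
    ∃ j < dna_short.toList.length, dna_long.toList[i + j]? = dna_short.toList[j]?
instance (dna_long : String) (dna_short : String) : Decidable (Pre_check_dna dna_long dna_short) := by
  unfold Pre_check_dna; infer_instance
def pvWitness_check_dna : String × String := ("ATCG", "TC")

def Spec_check_dna (dna_long : String) (dna_short : String) (out : String) : Prop := out = check_dna_alt dna_long dna_short
instance (dna_long : String) (dna_short : String) (out : String) : Decidable (Spec_check_dna dna_long dna_short out) := by unfold Spec_check_dna; infer_instance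

-- ===== CLAIM (what is proved, stated in full; the proofs are below) =====
def Claim_equal_check_dna : Prop := ∀ (dna_long : String) (dna_short : String), Dom_check_dna dna_long dna_short → Pre_check_dna dna_long dna_short → Spec_check_dna dna_long dna_short (check_dna dna_long dna_short)
-- ===== LEMMAS AND PROOFS =====

-- per-window match count (the common value both programs compute for window i)
def pvCnt (L S : List Char) (i : Nat) : Nat :=
  (List.range S.length).countP (fun j => L[i + j]? == S[j]?)

-- running maximum of the window counts of the first w windows (A's max_number)
def pvFmax (f : Nat → Int) (w : Nat) : Int :=
  (List.range w).foldl (fun a i => max a (f i)) 0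

lemma pvFmax_succ (f : Nat → Int) (w : Nat) :
    pvFmax f (w + 1) = max (pvFmax f w) (f w) := by
  simp [pvFmax, List.range_succ]

lemma le_pvFmax (f : Nat → Int) {w i : Nat} (h : i < w) : f i ≤ pvFmax f w := by
  induction w with
  | zero => omega
  | succ w ih =>
    rw [pvFmax_succ]
    rcases Nat.lt_succ_iff_lt_or_eq.mp h with h' | h'
    · exact le_max_of_le_left (ih h')
    · subst h'; exact le_max_right _ _

lemma pvFmax_attained (f : Nat → Int) (w : Nat) (h : 0 < pvFmax f w) :
    ∃ i < w, f i = pvFmax f w := by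
  induction w with
  | zero => simp [pvFmax] at h
  | succ w ih =>
    rw [pvFmax_succ] at h ⊢
    rcases le_total (f w) (pvFmax f w) with h' | h'
    · rw [max_eq_left h'] at h ⊢
      obtain ⟨i, hi, he⟩ := ih h
      exact ⟨i, by omega, he⟩
    · rw [max_eq_right h']
      exact ⟨w, by omega, rfl⟩

lemma innerA_eq_cnt (L S : List Char) (i : Nat) :
    (PySem.List.pyRange 0 (S.length : Int) 1).foldl
      (fun n j => if PySem.List.pyGet? S j = PySem.List.pyGet? L (j + (i : Int)) then n + 1 else n) (0 : Int)
    = (pvCnt L S i : Int) := by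
  have h1 : (PySem.List.pyRange 0 (S.length : Int) 1).foldl
      (fun n j => if PySem.List.pyGet? S j = PySem.List.pyGet? L (j + (i : Int)) then n + 1 else n) (0 : Int)
      = (PySem.List.pyRange 0 (S.length : Int) 1).foldl
      (fun n j => if (fun k => PySem.List.pyGet? S k == PySem.List.pyGet? L (k + (i : Int))) j = true then n + 1 else n) (0 : Int) := by
    simp
  rw [h1, PySem.List.foldl_count_if, PySem.List.pyRange_zero_natCast, List.countP_map]
  unfold pvCnt
  rw [zero_add]
  congr 1
  apply List.countP_congr
  intro j _
  simp only [Function.comp_def, beq_iff_eq]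
  have : ((j : Int) + (i : Int)) = ((j + i : Nat) : Int) := by push_cast; ring
  rw [this, PySem.List.pyGet?_natCast, PySem.List.pyGet?_natCast]
  constructor
  · intro h; rw [Nat.add_comm]; exact h.symm
  · intro h; rw [Nat.add_comm i j] at h; exact h.symm

lemma foldl_max_comm (l : List Int) (a b : Int) :
    List.foldl max (max a b) l = max a (List.foldl max b l) := by
  induction l generalizing b with
  | nil => rfl
  | cons x l ih => rw [List.foldl_cons, List.foldl_cons, max_assoc, ih]

lemma track_fst (f : Nat → Int) (w : Nat) :
    ((List.range w).foldl
      (fun (st : Int × Option Int) iN => if f iN > st.1 then (f iN, some ((iN : Nat) : Int)) else st)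
      ((0 : Int), (none : Option Int))).1 = pvFmax f w := by
  induction w with
  | zero => simp [pvFmax]
  | succ w ih =>
    rw [pvFmax_succ, List.range_succ, List.foldl_append]
    simp only [List.foldl_cons, List.foldl_nil]
    split_ifs with h
    · rw [ih] at h; simp; omega
    · rw [ih] at h ⊢; omega

lemma track_snd (f : Nat → Int) (w : Nat) (h : 0 < pvFmax f w) :
    ((List.range w).foldl
      (fun (st : Int × Option Int) iN => if f iN > st.1 then (f iN, some ((iN : Nat) : Int)) else st)
      ((0 : Int), (none : Option Int))).2
    = ((List.range w).find? (fun i => f i == pvFmax f w)).map (fun i => (i : Int)) := by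
  induction w with
  | zero => simp [pvFmax] at h
  | succ w ih =>
    rw [List.range_succ, List.foldl_append, List.find?_append]
    simp only [List.foldl_cons, List.foldl_nil]
    rw [track_fst]
    rw [pvFmax_succ] at h ⊢
    split_ifs with hgt
    · have hmax : max (pvFmax f w) (f w) = f w := max_eq_right (le_of_lt hgt)
      rw [hmax]
      have hnone : (List.range w).find? (fun i => f i == f w) = none := by
        rw [List.find?_eq_none]
        intro i hi
        have := le_pvFmax f (List.mem_range.mp hi)
        simp only [beq_iff_eq]
        omega
      simp [hnone]
    · have hle : f w ≤ pvFmax f w := by omega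
      have hmax : max (pvFmax f w) (f w) = pvFmax f w := max_eq_left hle
      rw [hmax] at h ⊢
      obtain ⟨i, hi, he⟩ := pvFmax_attained f w h
      have hsome : ((List.range w).find? (fun i => f i == pvFmax f w)).isSome := by
        rw [List.find?_isSome]
        exact ⟨i, List.mem_range.mpr hi, by simp [he]⟩
      obtain ⟨j, hj⟩ := Option.isSome_iff_exists.mp hsome
      rw [ih h, hj]
      simp

-- ---- B-side machinery: the position lists and the scatter counter ----

-- the list (as Ints) of positions of base c in S, in increasing order
def pvPosL (S : List Char) (c : Char) : List Int :=
  ((PySem.List.enumerate S 0).filter (fun jc => jc.2 == c)).map (fun x => x.1)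

lemma pos_getD (S : List Char) (c : Char) :
    ((PySem.List.enumerate S 0).foldl
      (fun d jc => d.modify jc.2 [] (fun t => t ++ [jc.1])) PySem.Dict.empty).getD c []
    = pvPosL S c := by
  have h1 : (PySem.List.enumerate S 0).foldl
      (fun d jc => d.modify jc.2 [] (fun t => t ++ [jc.1])) PySem.Dict.empty
      = ((PySem.List.enumerate S 0).map Prod.swap).foldl
      (fun d p => d.modify p.1 [] (fun t => t ++ [p.2])) PySem.Dict.empty := by
    rw [List.foldl_map]
    simp only [Prod.fst_swap, Prod.snd_swap]
  rw [h1, PySem.Dict.getD_foldl_modify_append, PySem.Dict.getD_empty, List.filter_map,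
      List.map_map, List.nil_append]
  unfold pvPosL
  congr 1

lemma mem_pvPosL (S : List Char) (c : Char) (x : Int) :
    x ∈ pvPosL S c ↔ ∃ k : Nat, k < S.length ∧ x = (k : Int) ∧ S[k]? = some c := by
  unfold pvPosL
  simp only [List.mem_map, List.mem_filter, PySem.List.mem_enumerate_iff]
  constructor
  · rintro ⟨⟨j, ch⟩, ⟨⟨k, hk, heq⟩, hc⟩, hx⟩
    obtain ⟨h1, h2⟩ := Prod.mk.injEq .. ▸ heq
    refine ⟨k, hk, ?_, ?_⟩
    · simp at hx; omega
    · simp only [beq_iff_eq] at hc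
      rw [List.getElem?_eq_getElem hk, ← h2, hc]
  · rintro ⟨k, hk, hx, hs⟩
    rw [List.getElem?_eq_getElem hk] at hs
    refine ⟨((k : Int), S[k]), ⟨⟨k, hk, by simp⟩, ?_⟩, by simpa using hx.symm⟩
    simpa using hs

lemma nodup_pvPosL (S : List Char) (c : Char) : (pvPosL S c).Nodup := by
  unfold pvPosL
  have hpw := PySem.List.pairwise_lt_enumerate S 0
  have := hpw.filter (fun jc => jc.2 == c)
  have hmap : ((PySem.List.enumerate S 0).filter (fun jc => jc.2 == c)).map (fun x => x.1)
      |>.Pairwise (· < ·) := by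
    rw [List.pairwise_map]
    exact this
  exact hmap.imp ne_of_lt

-- the scattered keys produced by long-position p with base c (the inner loop's increments)
def pvKeys (S : List Char) (w : Int) (pc : Int × Char) : List Int :=
  ((pvPosL S pc.2).map (fun j => pc.1 - j)).filter (fun i => decide (0 ≤ i ∧ i < w))

lemma nested_getD {α : Type} (l : List α) (g : α → List Int) (d : PySem.Dict Int Int) (v : Int) :
    (l.foldl (fun d x => (g x).foldl (fun d i => d.modify i 0 (fun t => t + 1)) d) d).getD v 0
    = d.getD v 0 + ((l.flatMap g).count v : Int) := by
  induction l generalizing d with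
  | nil => simp
  | cons x l ih =>
    rw [List.foldl_cons, ih, PySem.Dict.getD_foldl_modify_add_one, List.flatMap_cons,
        List.count_append]
    push_cast
    ring

lemma count_flatMap_sum {α : Type} (l : List α) (g : α → List Int) (v : Int) :
    (l.flatMap g).count v = (l.map (fun x => (g x).count v)).sum := by
  induction l with
  | nil => simp
  | cons x l ih => rw [List.flatMap_cons, List.count_append, List.map_cons, List.sum_cons, ih]

lemma sum_map_ite_nat {α : Type} (l : List α) (p : α → Prop) [DecidablePred p] :
    (l.map (fun x => if p x then (1 : Nat) else 0)).sum = l.countP (fun x => decide (p x)) := by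
  induction l with
  | nil => simp
  | cons x l ih =>
    rw [List.map_cons, List.sum_cons, List.countP_cons, ih]
    by_cases h : p x <;> simp [h, Nat.add_comm]

lemma count_pvKeys (S : List Char) (w : Int) (pc : Int × Char) (i : Int)
    (hq : 0 ≤ i ∧ i < w) :
    (pvKeys S w pc).count i = if (pc.1 - i) ∈ pvPosL S pc.2 then 1 else 0 := by
  unfold pvKeys
  rw [List.count_filter (by simpa using hq)]
  have hinj : Function.Injective (fun j : Int => pc.1 - j) := sub_right_injective
  have hcm : ((pvPosL S pc.2).map (fun j : Int => pc.1 - j)).count i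
      = (pvPosL S pc.2).count (pc.1 - i) := by
    have h := List.count_map_of_injective (pvPosL S pc.2) (fun j : Int => pc.1 - j) hinj (pc.1 - i)
    simpa using h
  rw [hcm]
  by_cases hm : (pc.1 - i) ∈ pvPosL S pc.2
  · rw [if_pos hm]
    have h1 := List.nodup_iff_count_le_one.mp (nodup_pvPosL S pc.2) (pc.1 - i)
    have h2 := List.count_pos_iff.mpr hm
    omega
  · rw [if_neg hm]
    exact List.count_eq_zero_of_not_mem hm

-- the central fact: B's counter at an admissible offset ii is the window match count
lemma counts_getD (L S : List Char) (ii : Nat)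
    (hm : S.length ≤ L.length) (hii : ii < L.length - S.length + 1) :
    (((PySem.List.enumerate L 0).flatMap
        (pvKeys S ((L.length : Int) - (S.length : Int) + 1))).count ((ii : Nat) : Int))
    = pvCnt L S ii := by
  set w : Int := (L.length : Int) - (S.length : Int) + 1 with hw
  have hqi : 0 ≤ ((ii : Nat) : Int) ∧ ((ii : Nat) : Int) < w := by
    constructor
    · positivity
    · rw [hw]; omega
  rw [count_flatMap_sum]
  -- rewrite the per-entry counts as indicators of membership in the position list
  have hmapcongr : (PySem.List.enumerate L 0).map
        (fun pc => (pvKeys S w pc).count ((ii : Nat) : Int))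
      = (PySem.List.enumerate L 0).map
        (fun pc => if (pc.1 - ((ii : Nat) : Int)) ∈ pvPosL S pc.2 then (1 : Nat) else 0) := by
    apply List.map_congr_left
    intro pc _
    rw [count_pvKeys S w pc _ hqi]
  rw [hmapcongr]
  -- expand enumerate as a map over range, turning the sum into a countP over range L.length
  rw [show PySem.List.enumerate L 0 = PySem.List.enumerate L from rfl,
      PySem.List.enumerate_eq_map_pyRange L 'A',
      show PySem.List.len L = (L.length : Int) from rfl,
      PySem.List.pyRange_zero_natCast, List.map_map, List.map_map]
  show ((List.range L.length).map
      (fun k : Nat => if ((k : Int) - ((ii : Nat) : Int)) ∈ pvPosL S (PySem.List.pyGetD L (k : Int) 'A')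
        then (1 : Nat) else 0)).sum = pvCnt L S ii
  rw [sum_map_ite_nat]
  -- countP over range L.length of the shifted predicate equals pvCnt
  unfold pvCnt
  have hsplit : List.range L.length
      = List.range' 0 ii ++ List.range' ii S.length ++ List.range' (ii + S.length) (L.length - ii - S.length) := by
    rw [List.range_eq_range']
    rw [show (ii + S.length) = 0 + 1 * (ii + S.length) by ring]
    rw [show List.range' 0 ii ++ List.range' ii S.length
        = List.range' 0 (ii + S.length) by
      rw [← List.range'_append (s := 0) (m := ii) (n := S.length) (step := 1)]
      norm_num]
    rw [List.range'_append]
    congr 1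
    omega
  rw [hsplit, List.countP_append, List.countP_append]
  have hlow : (List.range' 0 ii).countP
      (fun k : Nat => decide (((k : Int) - ((ii : Nat) : Int)) ∈ pvPosL S (PySem.List.pyGetD L (k : Int) 'A'))) = 0 := by
    rw [List.countP_eq_zero]
    intro k hk
    rw [List.mem_range'_1] at hk
    simp only [decide_eq_true_eq, mem_pvPosL]
    rintro ⟨jn, hjn, heq, -⟩
    omega
  have hhigh : (List.range' (ii + S.length) (L.length - ii - S.length)).countP
      (fun k : Nat => decide (((k : Int) - ((ii : Nat) : Int)) ∈ pvPosL S (PySem.List.pyGetD L (k : Int) 'A'))) = 0 := by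
    rw [List.countP_eq_zero]
    intro k hk
    rw [List.mem_range'_1] at hk
    simp only [decide_eq_true_eq, mem_pvPosL]
    rintro ⟨jn, hjn, heq, -⟩
    omega
  rw [hlow, hhigh]
  rw [List.range'_eq_map_range, List.countP_map]
  rw [Nat.zero_add, Nat.add_zero]
  apply List.countP_congr
  intro j hj
  rw [List.mem_range] at hj
  simp only [Function.comp_def, decide_eq_true_eq, mem_pvPosL, beq_iff_eq]
  have hlt : ii + j < L.length := by omega
  have hgd : PySem.List.pyGetD L ((ii + j : Nat) : Int) 'A' = L[ii + j] := by
    rw [PySem.List.pyGetD_natCast, List.getD_eq_getElem?_getD, List.getElem?_eq_getElem hlt]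
    rfl
  constructor
  · rintro ⟨jn, hjn, heq, hs⟩
    have : jn = j := by omega
    subst this
    rw [hgd] at hs
    rw [List.getElem?_eq_getElem hlt, hs]
  · intro h
    refine ⟨j, hj, by push_cast; ring, ?_⟩
    rw [hgd]
    rw [List.getElem?_eq_getElem hlt] at h
    exact h.symm

lemma pairwise_pvPosL (S : List Char) (c : Char) : (pvPosL S c).Pairwise (· < ·) := by
  unfold pvPosL
  rw [List.pairwise_map]
  exact (PySem.List.pairwise_lt_enumerate S 0).filter _

-- binary-search contract: everything left of the result is ≤ x, everything right of it is > x
lemma pvFirstGreater_spec (a : List Int) (x : Int)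
    (hs : ∀ i j : Nat, i < j → j < a.length → a.getD i 0 < a.getD j 0) :
    ∀ (n lo hi : Nat), hi - lo ≤ n → lo ≤ hi → hi ≤ a.length →
    (∀ k, k < lo → a.getD k 0 ≤ x) →
    (∀ k, hi ≤ k → k < a.length → x < a.getD k 0) →
    lo ≤ pvFirstGreater a x lo hi ∧ pvFirstGreater a x lo hi ≤ hi ∧
    (∀ k, k < pvFirstGreater a x lo hi → a.getD k 0 ≤ x) ∧
    (∀ k, pvFirstGreater a x lo hi ≤ k → k < a.length → x < a.getD k 0) := by
  intro n
  induction n with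
  | zero =>
    intro lo hi hn hlh hha hlow hhigh
    have heq : lo = hi := by omega
    rw [pvFirstGreater, dif_neg (by omega)]
    subst heq
    exact ⟨le_refl _, le_refl _, hlow, hhigh⟩
  | succ n ih =>
    intro lo hi hn hlh hha hlow hhigh
    by_cases h : lo < hi
    · rw [pvFirstGreater, dif_pos h]
      by_cases hm : a.getD ((lo + hi) / 2) 0 ≤ x
      · rw [if_pos hm]
        have hres := ih ((lo + hi) / 2 + 1) hi (by omega) (by omega) hha
          (by
            intro k hk
            rcases Nat.lt_succ_iff_lt_or_eq.mp hk with hk' | hk'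
            · exact le_of_lt (lt_of_lt_of_le (hs k _ hk' (by omega)) hm)
            · rw [hk']; exact hm)
          hhigh
        exact ⟨by omega, hres.2.1, hres.2.2.1, hres.2.2.2⟩
      · rw [if_neg hm]
        rw [Int.not_le] at hm
        have hres := ih lo ((lo + hi) / 2) (by omega) (by omega) (by omega) hlow
          (by
            intro k hk hkl
            rcases Nat.lt_or_ge ((lo + hi) / 2) k with hk' | hk'
            · exact lt_trans hm (hs _ k hk' hkl)
            · have : k = (lo + hi) / 2 := by omega
              rw [this]; exact hm)
        exact ⟨hres.1, by omega, hres.2.2.1, hres.2.2.2⟩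
    · rw [pvFirstGreater, dif_neg h]
      have heq : lo = hi := by omega
      subst heq
      exact ⟨le_refl _, le_refl _, hlow, hhigh⟩

-- sortedness as a getD statement
lemma pvPosL_getD_mono (a : List Int) (hpw : a.Pairwise (· < ·)) :
    ∀ i j : Nat, i < j → j < a.length → a.getD i 0 < a.getD j 0 := by
  intro i j hij hj
  rw [List.getD_eq_getElem a 0 (by omega), List.getD_eq_getElem a 0 hj]
  exact List.pairwise_iff_getElem.mp hpw i j (by omega) hj hij

-- the index segment the two binary searches delimit holds exactly the list
-- elements in the half-open value interval (x1, x2]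
lemma bisect_segment (a : List Int) (x1 x2 : Int) (hx : x1 ≤ x2)
    (hpw : a.Pairwise (· < ·)) :
    (List.range (pvFirstGreater a x2 0 a.length - pvFirstGreater a x1 0 a.length)).map
      (fun k => a.getD (pvFirstGreater a x1 0 a.length + k) 0)
    = a.filter (fun j => decide (x1 < j ∧ j ≤ x2)) := by
  have hs := pvPosL_getD_mono a hpw
  obtain ⟨-, hr1b, h1le, h1gt⟩ := pvFirstGreater_spec a x1 hs a.length 0 a.length
    (by omega) (by omega) (le_refl _) (by omega) (by intro k hk hkl; omega)
  obtain ⟨-, hr2b, h2le, h2gt⟩ := pvFirstGreater_spec a x2 hs a.length 0 a.length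
    (by omega) (by omega) (le_refl _) (by omega) (by intro k hk hkl; omega)
  set r1 := pvFirstGreater a x1 0 a.length with hr1
  set r2 := pvFirstGreater a x2 0 a.length with hr2
  have hr12 : r1 ≤ r2 := by
    by_contra hcon
    rw [Nat.not_le] at hcon
    have h1 := h1le r2 hcon
    have h2 := h2gt r2 (le_refl _) (by omega)
    omega
  have hseg : (List.range (r2 - r1)).map (fun k => a.getD (r1 + k) 0)
      = (a.drop r1).take (r2 - r1) := by
    apply List.ext_getElem
    · simp only [List.length_map, List.length_range, List.length_take, List.length_drop]
      omega
    · intro i h1 h2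
      simp only [List.getElem_map, List.getElem_range, List.getElem_take, List.getElem_drop]
      rw [List.getD_eq_getElem a 0 (by
        simp only [List.length_take, List.length_drop] at h2
        omega)]
  rw [hseg]
  have hdecomp : a = a.take r1 ++ ((a.drop r1).take (r2 - r1) ++ a.drop r2) := by
    rw [show a.drop r2 = (a.drop r1).drop (r2 - r1) by
      rw [List.drop_drop]; congr 1; omega]
    rw [List.take_append_drop, List.take_append_drop]
  conv_rhs => rw [hdecomp]
  rw [List.filter_append, List.filter_append]
  have hfirst : (a.take r1).filter (fun j => decide (x1 < j ∧ j ≤ x2)) = [] := by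
    rw [List.filter_eq_nil_iff]
    intro j hj
    obtain ⟨k, hk, he⟩ := List.mem_take_iff_getElem.mp hj
    have := h1le k (by omega)
    rw [List.getD_eq_getElem a 0 (by omega)] at this
    simp only [decide_eq_true_eq, not_and, not_le]
    intro hx1
    omega
  have hlast : (a.drop r2).filter (fun j => decide (x1 < j ∧ j ≤ x2)) = [] := by
    rw [List.filter_eq_nil_iff]
    intro j hj
    obtain ⟨k, hk, he⟩ := List.mem_drop_iff_getElem.mp hj
    have := h2gt (r2 + k) (by omega) (by omega)
    rw [List.getD_eq_getElem a 0 (by omega)] at this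
    simp only [decide_eq_true_eq, not_and, not_le]
    intro hx1
    omega
  have hmid : ((a.drop r1).take (r2 - r1)).filter (fun j => decide (x1 < j ∧ j ≤ x2))
      = (a.drop r1).take (r2 - r1) := by
    rw [List.filter_eq_self]
    intro j hj
    obtain ⟨k, hk, he⟩ := List.mem_take_iff_getElem.mp hj
    rw [List.getElem_drop] at he
    simp only [List.length_drop] at hk
    have hkl : r1 + k < a.length := by omega
    have hgt := h1gt (r1 + k) (by omega) hkl
    have hle := h2le (r1 + k) (by omega)
    rw [List.getD_eq_getElem a 0 hkl] at hgt hle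
    simp only [decide_eq_true_eq]
    constructor <;> omega
  rw [hfirst, hlast, hmid, List.nil_append, List.append_nil]

-- the clipped interval, shifted by p, is exactly the unconditional filter pvKeys
lemma filterInterval_map_eq_pvKeys (S : List Char) (w : Int) (pc : Int × Char) :
    ((pvPosL S pc.2).filter (fun j => decide (pc.1 - w < j ∧ j ≤ pc.1))).map (fun j => pc.1 - j)
    = pvKeys S w pc := by
  unfold pvKeys
  rw [List.filter_map]
  congr 1
  apply List.filter_congr
  intro j _
  simp only [Function.comp_def, decide_eq_decide]
  omega

lemma find?_congr_mem {α : Type} (l : List α) (p q : α → Bool)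
    (h : ∀ x ∈ l, p x = q x) : l.find? p = l.find? q := by
  induction l with
  | nil => rfl
  | cons x l ih =>
    rw [List.find?_cons, List.find?_cons, h x (by simp)]
    split <;> [rfl; exact ih (fun y hy => h y (by simp [hy]))]

-- ===== VERDICT (by name: the statement is the Claim_ definition above) =====
theorem check_dna_spec : Claim_equal_check_dna := by
  intro l s _ hpre
  unfold Spec_check_dna
  obtain ⟨hmn, i0, hi0, j0, hj0, heq0⟩ := hpre
  set L := l.toList with hL
  set S := s.toList with hS
  set w := L.length - S.length + 1 with hw
  set cf : Nat → Int := fun k => (pvCnt L S k : Int) with hcf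
  have hcast : ((L.length : Int) - (S.length : Int) + 1) = ((w : Nat) : Int) := by
    simp only [hw]; push_cast; omega
  -- positivity of the max
  have hcnt0 : 0 < pvCnt L S i0 := by
    unfold pvCnt
    rw [List.countP_pos_iff]
    exact ⟨j0, List.mem_range.mpr hj0, by simp [heq0]⟩
  have hmx : 0 < pvFmax cf w := lt_of_lt_of_le (by simp only [hcf]; exact_mod_cast hcnt0) (le_pvFmax cf hi0)
  -- the first index attaining the max
  obtain ⟨ia, hia, hea⟩ := pvFmax_attained cf w hmx
  obtain ⟨i1, hfind⟩ : ∃ i1, (List.range w).find? (fun i => cf i == pvFmax cf w) = some i1 := by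
    apply Option.isSome_iff_exists.mp
    rw [List.find?_isSome]
    exact ⟨ia, List.mem_range.mpr hia, by simp [hea]⟩
  have hA : check_dna l s = String.ofList (PySem.List.slice L (some ((i1 : Nat) : Int))
      (some (((i1 : Nat) : Int) + ((S.length : Nat) : Int)))) := by
    unfold check_dna
    rw [← hL, ← hS]
    simp only [hcast, PySem.List.pyRange_zero_natCast, List.foldl_map]
    have hinner : ∀ iN : Nat, List.foldl
        (fun x (j : Nat) => if PySem.List.pyGet? S ((j : Nat) : Int) = PySem.List.pyGet? L (((j : Nat) : Int) + ((iN : Nat) : Int)) then x + 1 else x)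
        (0 : Int) (List.range S.length) = cf iN := by
      intro iN
      have h := innerA_eq_cnt L S iN
      simp only [PySem.List.pyRange_zero_natCast, List.foldl_map] at h
      rw [h, hcf]
    have hfun : (fun (st : Int × Option Int) (iN : Nat) =>
        if List.foldl (fun x (j : Nat) => if PySem.List.pyGet? S ((j : Nat) : Int) = PySem.List.pyGet? L (((j : Nat) : Int) + ((iN : Nat) : Int)) then x + 1 else x) (0 : Int) (List.range S.length) > st.1
        then (List.foldl (fun x (j : Nat) => if PySem.List.pyGet? S ((j : Nat) : Int) = PySem.List.pyGet? L (((j : Nat) : Int) + ((iN : Nat) : Int)) then x + 1 else x) (0 : Int) (List.range S.length), some ((iN : Nat) : Int)) else st)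
        = (fun (st : Int × Option Int) (iN : Nat) =>
            if cf iN > st.1 then (cf iN, some ((iN : Nat) : Int)) else st) := by
      funext st iN
      rw [hinner iN]
    rw [hfun, track_snd cf w hmx, hfind]
    simp
  have hB : check_dna_alt l s = String.ofList (PySem.List.slice L (some ((i1 : Nat) : Int))
      (some (((i1 : Nat) : Int) + ((S.length : Nat) : Int)))) := by
    unfold check_dna_alt
    rw [← hL, ← hS]
    simp only [hcast, PySem.List.pyRange_zero_natCast, List.map_map]
    set dC : PySem.Dict Int Int := (PySem.List.enumerate L 0).foldl
      (fun d pc =>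
        (PySem.List.pyRange
          ((pvFirstGreater (((PySem.List.enumerate S 0).foldl
            (fun d jc => d.modify jc.2 [] (fun t => t ++ [jc.1])) PySem.Dict.empty).getD pc.2 [])
            (pc.1 - ((w : Nat) : Int)) 0
            (((PySem.List.enumerate S 0).foldl
            (fun d jc => d.modify jc.2 [] (fun t => t ++ [jc.1])) PySem.Dict.empty).getD pc.2 []).length : Nat) : Int)
          ((pvFirstGreater (((PySem.List.enumerate S 0).foldl
            (fun d jc => d.modify jc.2 [] (fun t => t ++ [jc.1])) PySem.Dict.empty).getD pc.2 [])
            pc.1 0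
            (((PySem.List.enumerate S 0).foldl
            (fun d jc => d.modify jc.2 [] (fun t => t ++ [jc.1])) PySem.Dict.empty).getD pc.2 []).length : Nat) : Int) 1).foldl
          (fun d idx =>
            d.modify (pc.1 - PySem.List.pyGetD (((PySem.List.enumerate S 0).foldl
            (fun d jc => d.modify jc.2 [] (fun t => t ++ [jc.1])) PySem.Dict.empty).getD pc.2 []) idx 0) 0 (fun t => t + 1))
          d)
      PySem.Dict.empty with hdC
    -- the counter's lookups at the admissible offsets are the window counts
    have hbody : (fun (d : PySem.Dict Int Int) (pc : Int × Char) =>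
        (PySem.List.pyRange
          ((pvFirstGreater (((PySem.List.enumerate S 0).foldl
            (fun d jc => d.modify jc.2 [] (fun t => t ++ [jc.1])) PySem.Dict.empty).getD pc.2 [])
            (pc.1 - ((w : Nat) : Int)) 0
            (((PySem.List.enumerate S 0).foldl
            (fun d jc => d.modify jc.2 [] (fun t => t ++ [jc.1])) PySem.Dict.empty).getD pc.2 []).length : Nat) : Int)
          ((pvFirstGreater (((PySem.List.enumerate S 0).foldl
            (fun d jc => d.modify jc.2 [] (fun t => t ++ [jc.1])) PySem.Dict.empty).getD pc.2 [])
            pc.1 0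
            (((PySem.List.enumerate S 0).foldl
            (fun d jc => d.modify jc.2 [] (fun t => t ++ [jc.1])) PySem.Dict.empty).getD pc.2 []).length : Nat) : Int) 1).foldl
          (fun d idx =>
            d.modify (pc.1 - PySem.List.pyGetD (((PySem.List.enumerate S 0).foldl
            (fun d jc => d.modify jc.2 [] (fun t => t ++ [jc.1])) PySem.Dict.empty).getD pc.2 []) idx 0) 0 (fun t => t + 1))
          d)
        = (fun (d : PySem.Dict Int Int) (pc : Int × Char) =>
            (pvKeys S ((w : Nat) : Int) pc).foldl
              (fun d i => d.modify i 0 (fun t => t + 1)) d) := by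
      funext d pc
      rw [pos_getD]
      have hpw := pairwise_pvPosL S pc.2
      set js := pvPosL S pc.2 with hjs
      set r1 := pvFirstGreater js (pc.1 - ((w : Nat) : Int)) 0 js.length with hr1
      set r2 := pvFirstGreater js pc.1 0 js.length with hr2
      have hx : pc.1 - ((w : Nat) : Int) ≤ pc.1 := by omega
      have hseg := bisect_segment js (pc.1 - ((w : Nat) : Int)) pc.1 hx hpw
      rw [← hr1, ← hr2] at hseg
      rw [PySem.List.pyRange_one, List.foldl_map,
          show ((r2 : Int) - (r1 : Int)).toNat = r2 - r1 from by omega]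
      have hfun : (fun (d : PySem.Dict Int Int) (k : Nat) =>
          d.modify (pc.1 - PySem.List.pyGetD js ((r1 : Int) + (k : Int)) 0) 0 (fun t => t + 1))
          = (fun (d : PySem.Dict Int Int) (k : Nat) =>
              d.modify (pc.1 - js.getD (r1 + k) 0) 0 (fun t => t + 1)) := by
        funext d k
        rw [show ((r1 : Int) + (k : Int)) = ((r1 + k : Nat) : Int) from by push_cast; ring,
            PySem.List.pyGetD_natCast]
      rw [hfun,
          show (List.foldl (fun (d : PySem.Dict Int Int) (k : Nat) =>
              d.modify (pc.1 - js.getD (r1 + k) 0) 0 (fun t => t + 1)) d (List.range (r2 - r1)))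
            = (((List.range (r2 - r1)).map (fun k => pc.1 - js.getD (r1 + k) 0)).foldl
                (fun (d : PySem.Dict Int Int) i => d.modify i 0 (fun t => t + 1)) d)
            from by rw [List.foldl_map]]
      have hkeys : (List.range (r2 - r1)).map (fun k => pc.1 - js.getD (r1 + k) 0)
          = pvKeys S ((w : Nat) : Int) pc := by
        have h1 : (List.range (r2 - r1)).map (fun k => pc.1 - js.getD (r1 + k) 0)
            = ((List.range (r2 - r1)).map (fun k => js.getD (r1 + k) 0)).map (fun j => pc.1 - j) := by
          rw [List.map_map]
          rfl
        rw [h1, hseg]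
        exact filterInterval_map_eq_pvKeys S ((w : Nat) : Int) pc
      rw [hkeys]
    have hgd : ∀ k : Nat, k < w → dC.getD ((k : Nat) : Int) 0 = cf k := by
      intro k hk
      rw [hdC, hbody, nested_getD, PySem.Dict.getD_empty, zero_add, ← hcast,
          counts_getD L S k hmn (by omega), hcf]
    have hlist : (List.range w).map ((fun i => dC.getD i 0) ∘ (fun k : Nat => ((k : Nat) : Int)))
        = (List.range w).map cf := by
      apply List.map_congr_left
      intro k hk
      exact hgd k (List.mem_range.mp hk)
    rw [hlist]
    rcases hc : (List.range w).map cf with _ | ⟨c, t⟩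
    · exfalso
      have := congrArg List.length hc
      simp only [List.length_map, List.length_range, List.length_nil] at this
      omega
    · rw [PySem.List.max?_id_cons]
      have hbest : List.foldl max c t = pvFmax cf w := by
        have hm0 : pvFmax cf w = List.foldl max 0 ((List.range w).map cf) := by
          rw [List.foldl_map]; rfl
        rw [hm0, hc]
        have h1 : List.foldl max 0 (c :: t) = max 0 (List.foldl max c t) := by
          rw [List.foldl_cons, foldl_max_comm]
        rw [h1]
        rcases max_choice 0 (List.foldl max c t) with h' | h'
        · rw [hm0, hc, h1] at hmx; omega
        · rw [h']
      rw [hbest]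
      have hfind2 : ((List.range w).map (fun k : Nat => ((k : Nat) : Int))).find?
          (fun i => dC.getD i 0 == pvFmax cf w) = some ((i1 : Nat) : Int) := by
        rw [List.find?_map]
        have hcg : (List.range w).find? ((fun i => dC.getD i 0 == pvFmax cf w) ∘ (fun k : Nat => ((k : Nat) : Int)))
            = (List.range w).find? (fun k => cf k == pvFmax cf w) := by
          apply find?_congr_mem
          intro k hk
          simp only [Function.comp_def]
          rw [hgd k (List.mem_range.mp hk)]
        rw [hcg, hfind]
        rfl
      simp only [hfind2]
  rw [hA, hB]
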